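-- pv_equiv track=rewrite | github.com/zane529/Protenix | protenix/openfold_local/data/templates.py | _replace_obsolete_references
-- ===== SOURCE A (Python) =====
-- from typing import Any, Dict, Mapping, Optional, Sequence, Tuple
--
-- def _replace_obsolete_references(obsolete_mapping) -> Mapping[str, str]:
--     """Generates a new obsolete by tracing all cross-references and store the latest leaf to all referencing nodes"""
--     obsolete_new = {}
--     obsolete_keys = obsolete_mapping.keys()
--
--     def _new_target(k):
--         v = obsolete_mapping[k]
--         if v in obsolete_keys:
--             return _new_target(v)
--         return v
--
--     for k in obsolete_keys:
--         obsolete_new[k] = _new_target(k)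
--
--     return obsolete_new
-- ===== SOURCE B (Python) =====
-- def _replace_obsolete_references(obsolete_mapping):
--     """Same result as A, but memoizes resolved leaf targets with path
--     compression so each node's chain is traced only once."""
--     resolved = {}
--     out = {}
--     for k in obsolete_mapping:
--         chain = []
--         cur = k
--         while cur in obsolete_mapping and cur not in resolved:
--             chain.append(cur)
--             cur = obsolete_mapping[cur]
--         leaf = resolved.get(cur, cur)
--         for c in chain:
--             resolved[c] = leaf
--         out[k] = leaf
--     return out
-- ===== Notes on version B (the rewrite author's own statement) =====
-- stated objective: alternative
-- what changed: B replaces A's per-key recursive chain re-tracing with a single pass that memoizes every resolved node's leaf (path compression), so each chain node is traversed once overall; on the sampled random inputs chains are short and no speed-up was measured.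
import Mathlib
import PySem

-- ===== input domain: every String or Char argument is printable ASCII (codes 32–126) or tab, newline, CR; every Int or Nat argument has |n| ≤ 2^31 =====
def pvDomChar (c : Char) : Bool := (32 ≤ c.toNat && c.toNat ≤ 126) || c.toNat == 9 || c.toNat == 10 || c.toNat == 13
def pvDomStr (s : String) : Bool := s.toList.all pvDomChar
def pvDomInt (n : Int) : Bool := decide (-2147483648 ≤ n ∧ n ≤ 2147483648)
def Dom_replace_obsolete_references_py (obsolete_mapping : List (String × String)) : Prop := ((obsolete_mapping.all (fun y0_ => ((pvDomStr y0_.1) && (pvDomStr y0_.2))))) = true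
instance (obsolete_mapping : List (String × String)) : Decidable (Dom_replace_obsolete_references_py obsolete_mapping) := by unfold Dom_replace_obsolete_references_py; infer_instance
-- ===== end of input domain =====

-- B memoizes resolved leaf targets (path compression) in one pass instead of A's per-key
-- recursive chain re-tracing; objective: alternative (each chain node is traversed once overall).


-- one step of chain following: obsolete_mapping[x] if x is a key, else x itself
def pvF (m : PySem.Dict String String) (x : String) : String := (m.get? x).getD x

-- ===== PORT A =====
-- A's recursive _new_target; fuel bounds the recursion depth (under Pre_ the chain from any
-- key escapes the key set within m.size steps, so fuel m.size+1 is never exhausted).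
-- At every call site k is a key of m, so (m.get? k).getD k is exactly Python's m[k].
def pvNewTarget (m : PySem.Dict String String) : Nat → String → String
  | 0, k => pvF m k
  | fuel+1, k =>
      let v := pvF m k
      if (m.get? v).isSome then pvNewTarget m fuel v else v

def replace_obsolete_references_py (obsolete_mapping : List (String × String)) : List (String × String) :=
  ((PySem.Dict.ofList obsolete_mapping).keys.foldl
    (fun acc k => acc.insert k (pvNewTarget (PySem.Dict.ofList obsolete_mapping)
      ((PySem.Dict.ofList obsolete_mapping).size + 1) k))
    PySem.Dict.empty).items

-- ===== PORT B =====
-- B's while loop: collect the chain of not-yet-resolved keys from cur, return (chain, final cur)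
def pvChain (m r : PySem.Dict String String) : Nat → String → List String × String
  | 0, cur => ([], cur)
  | fuel+1, cur =>
      if m.contains cur && !(r.contains cur) then
        let p := pvChain m r fuel (pvF m cur)
        (cur :: p.1, p.2)
      else ([], cur)

-- B's loop body for one key k: trace the chain, look the leaf up (memo or the escaped node),
-- record the leaf for every chain node, and emit (k, leaf)
def pvResolveStep (m : PySem.Dict String String) (fuel : Nat)
    (st : PySem.Dict String String × PySem.Dict String String) (k : String) :
    PySem.Dict String String × PySem.Dict String String :=
  let pc := pvChain m st.2 fuel k
  let leaf := (st.2.get? pc.2).getD pc.2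
  (st.1.insert k leaf, pc.1.foldl (fun r c => r.insert c leaf) st.2)

def replace_obsolete_references_py_alt (obsolete_mapping : List (String × String)) : List (String × String) :=
  (((PySem.Dict.ofList obsolete_mapping).keys.foldl
    (pvResolveStep (PySem.Dict.ofList obsolete_mapping) ((PySem.Dict.ofList obsolete_mapping).size + 1))
    (PySem.Dict.empty, PySem.Dict.empty)).1).items

-- ===== PRECONDITION & SPEC =====
-- Pre_ excludes cyclic reference chains, on which A's recursion never terminates (Python raises
-- RecursionError, so A returns no value there; B's while loop diverges there too).
-- Closed form: following the mapping m.size times from any key leaves the key set (true iff the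
-- functional graph of the mapping restricted to its keys is acyclic).
def Pre_replace_obsolete_references_py (obsolete_mapping : List (String × String)) : Prop :=
  ∀ k ∈ (PySem.Dict.ofList obsolete_mapping).keys,
    ((PySem.Dict.ofList obsolete_mapping).get?
      ((pvF (PySem.Dict.ofList obsolete_mapping))^[(PySem.Dict.ofList obsolete_mapping).size] k)).isSome = false
instance (obsolete_mapping : List (String × String)) : Decidable (Pre_replace_obsolete_references_py obsolete_mapping) := by unfold Pre_replace_obsolete_references_py; infer_instance

def pvWitness_replace_obsolete_references_py : (List (String × String)) := [("a", "b"), ("b", "c")]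

def Spec_replace_obsolete_references_py (obsolete_mapping : List (String × String)) (out : List (String × String)) : Prop := out = replace_obsolete_references_py_alt obsolete_mapping
instance (obsolete_mapping : List (String × String)) (out : List (String × String)) : Decidable (Spec_replace_obsolete_references_py obsolete_mapping out) := by unfold Spec_replace_obsolete_references_py; infer_instance

-- ===== CLAIM (what is proved, stated in full; the proofs are below) =====
def Claim_equal_replace_obsolete_references_py : Prop := ∀ (obsolete_mapping : List (String × String)), Dom_replace_obsolete_references_py obsolete_mapping → Pre_replace_obsolete_references_py obsolete_mapping → Spec_replace_obsolete_references_py obsolete_mapping (replace_obsolete_references_py obsolete_mapping)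

-- ===== LEMMAS AND PROOFS =====

theorem pvF_fixed {m : PySem.Dict String String} {x : String}
    (h : (m.get? x).isSome = false) : pvF m x = x := by
  unfold pvF; cases hx : m.get? x with
  | none => rfl
  | some v => rw [hx] at h; simp at h

theorem pvIter_fixed {m : PySem.Dict String String} {x : String}
    (h : (m.get? x).isSome = false) (t : Nat) : (pvF m)^[t] x = x :=
  Function.iterate_fixed (pvF_fixed h) t

-- from Pre_: from ANY string, m.size steps of pvF land outside the key set
theorem pvEscape {l : List (String × String)}
    (hpre : Pre_replace_obsolete_references_py l) :
    ∀ x, ((PySem.Dict.ofList l).get?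
      ((pvF (PySem.Dict.ofList l))^[(PySem.Dict.ofList l).size] x)).isSome = false := by
  intro x
  by_cases h : ((PySem.Dict.ofList l).get? x).isSome = false
  · rw [pvIter_fixed h]; exact h
  · apply hpre
    have hb : ((PySem.Dict.ofList l).get? x).isSome = true := by
      cases hx : ((PySem.Dict.ofList l).get? x).isSome
      · exact absurd hx h
      · rfl
    rw [← PySem.Dict.contains_eq_isSome_get?] at hb
    exact (PySem.Dict.contains_iff_mem_keys _ x).mp hb

-- once escaped, one more step is the identity: (pvF m)^[n+1] x = (pvF m)^[n] x
theorem pvIter_succ_eq {m : PySem.Dict String String} {n : Nat}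
    (hesc : ∀ y, (m.get? ((pvF m)^[n] y)).isSome = false) (x : String) :
    (pvF m)^[n+1] x = (pvF m)^[n] x := by
  rw [Function.iterate_succ_apply', pvF_fixed (hesc x)]

-- the resolution is invariant under one chain step
theorem pvRes_f {m : PySem.Dict String String} {n : Nat}
    (hesc : ∀ y, (m.get? ((pvF m)^[n] y)).isSome = false) (x : String) :
    (pvF m)^[n] (pvF m x) = (pvF m)^[n] x := by
  rw [← Function.iterate_succ_apply, pvIter_succ_eq hesc]

-- A's _new_target with enough fuel computes the iterated resolution
theorem pvNewTarget_eq (m : PySem.Dict String String) :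
    ∀ (fuel : Nat) (x : String),
      (m.get? ((pvF m)^[fuel] (pvF m x))).isSome = false →
      pvNewTarget m (fuel+1) x = (pvF m)^[fuel] (pvF m x) := by
  intro fuel
  induction fuel with
  | zero =>
      intro x h
      simp only [Function.iterate_zero_apply] at h ⊢
      rw [show pvNewTarget m 1 x
          = (if (m.get? (pvF m x)).isSome then pvNewTarget m 0 (pvF m x) else pvF m x) from rfl,
        if_neg (by simp [h])]
  | succ t ih =>
      intro x h
      rw [show pvNewTarget m (t+1+1) x
          = (if (m.get? (pvF m x)).isSome then pvNewTarget m (t+1) (pvF m x) else pvF m x) from rfl]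
      by_cases hv : (m.get? (pvF m x)).isSome = true
      · rw [if_pos hv, ih (pvF m x) (by rwa [← Function.iterate_succ_apply])]
        exact (Function.iterate_succ_apply _ _ _).symm
      · rw [if_neg hv]
        exact (pvIter_fixed (by simpa using hv) (t+1)).symm

theorem pvNewTarget_res {m : PySem.Dict String String} {n : Nat}
    (hesc : ∀ y, (m.get? ((pvF m)^[n] y)).isSome = false) (x : String) :
    pvNewTarget m (n+1) x = (pvF m)^[n] x := by
  rw [pvNewTarget_eq m n x (hesc (pvF m x)), pvRes_f hesc]

-- the memo invariant: every recorded value is the true resolution of its key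
def pvInv (m : PySem.Dict String String) (n : Nat) (r : PySem.Dict String String) : Prop :=
  ∀ c v, r.get? c = some v → v = (pvF m)^[n] c

theorem pvChain_spec {m : PySem.Dict String String} {n : Nat}
    (hesc : ∀ y, (m.get? ((pvF m)^[n] y)).isSome = false) :
    ∀ (fuel : Nat) (r : PySem.Dict String String), pvInv m n r → ∀ (x : String),
      (m.get? ((pvF m)^[fuel] x)).isSome = false →
      ((r.get? (pvChain m r fuel x).2).getD (pvChain m r fuel x).2 = (pvF m)^[n] x) ∧
      (∀ c ∈ (pvChain m r fuel x).1, (pvF m)^[n] c = (pvF m)^[n] x) := by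
  intro fuel
  induction fuel with
  | zero =>
      intro r hinv x h
      simp only [pvChain]
      refine ⟨?_, by intro c hc; simp at hc⟩
      cases hr : r.get? x with
      | none =>
          simp only [Option.getD_none]
          exact (pvIter_fixed (by simpa using h) n).symm
      | some v =>
          simp only [Option.getD_some]
          exact hinv x v hr
  | succ t ih =>
      intro r hinv x h
      have hunf : pvChain m r (t+1) x
          = (if m.contains x && !(r.contains x) then
              (x :: (pvChain m r t (pvF m x)).1, (pvChain m r t (pvF m x)).2)
            else ([], x)) := rfl
      by_cases hcond : (m.contains x && !(r.contains x)) = true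
      · rw [hunf, if_pos hcond]
        have hnext : (m.get? ((pvF m)^[t] (pvF m x))).isSome = false := by
          rwa [← Function.iterate_succ_apply]
        obtain ⟨h1, h2⟩ := ih r hinv (pvF m x) hnext
        refine ⟨?_, ?_⟩
        · simpa [pvRes_f hesc] using h1
        · intro c hc
          rcases List.mem_cons.mp hc with rfl | hc
          · rfl
          · rw [h2 c hc, pvRes_f hesc]
      · rw [hunf, if_neg hcond]
        refine ⟨?_, by intro c hc; simp at hc⟩
        cases hr : r.get? x with
        | none =>
            simp only [Option.getD_none]
            have hrc : r.contains x = false := by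
              rw [PySem.Dict.contains_eq_isSome_get?, hr]; rfl
            have hmc : m.contains x = false := by
              cases hmv : m.contains x
              · rfl
              · exact absurd (by simp [hmv, hrc]) hcond
            have hmn : (m.get? x).isSome = false := by
              rwa [← PySem.Dict.contains_eq_isSome_get?]
            exact (pvIter_fixed hmn n).symm
        | some v =>
            simp only [Option.getD_some]
            exact hinv x v hr

theorem pvInv_fold {m : PySem.Dict String String} {n : Nat} (leaf : String) :
    ∀ (chain : List String) (r : PySem.Dict String String), pvInv m n r →
      (∀ c ∈ chain, (pvF m)^[n] c = leaf) →
      pvInv m n (chain.foldl (fun r c => r.insert c leaf) r) := by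
  intro chain
  induction chain with
  | nil => intro r hinv _; simpa using hinv
  | cons c cs ih =>
      intro r hinv hc
      simp only [List.foldl_cons]
      apply ih
      · intro c' v hv
        rw [PySem.Dict.get?_insert] at hv
        by_cases hcc : c' = c
        · rw [if_pos hcc] at hv
          cases hv
          rw [hcc]
          exact (hc c (List.mem_cons_self)).symm
        · rw [if_neg hcc] at hv
          exact hinv c' v hv
      · intro c' hc'
        exact hc c' (List.mem_cons_of_mem c hc')

-- the two folds agree: A inserts (k, resolution k); B does the same while maintaining the memo
theorem pvFold_eq {m : PySem.Dict String String} {n : Nat}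
    (hesc : ∀ y, (m.get? ((pvF m)^[n] y)).isSome = false) :
    ∀ (ks : List String) (out r : PySem.Dict String String), pvInv m n r →
      ks.foldl (fun acc k => acc.insert k (pvNewTarget m (n + 1) k)) out
        = (ks.foldl (pvResolveStep m (n + 1)) (out, r)).1 := by
  intro ks
  induction ks with
  | nil => intro out r _; rfl
  | cons k ks ih =>
      intro out r hinv
      simp only [List.foldl_cons]
      have hfuel : (m.get? ((pvF m)^[n+1] k)).isSome = false := by
        rw [pvIter_succ_eq hesc]; exact hesc k
      obtain ⟨hleaf, hchain⟩ := pvChain_spec hesc (n+1) r hinv k hfuel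
      have hstep : pvResolveStep m (n + 1) (out, r) k
          = (out.insert k ((pvF m)^[n] k),
             (pvChain m r (n+1) k).1.foldl
               (fun r c => r.insert c ((pvF m)^[n] k)) r) := by
        simp only [pvResolveStep, hleaf]
      rw [hstep, pvNewTarget_res hesc]
      exact ih (out.insert k ((pvF m)^[n] k)) _ (pvInv_fold _ _ r hinv hchain)

-- ===== VERDICT (by name: the statement is the Claim_ definition above) =====
theorem replace_obsolete_references_py_spec : Claim_equal_replace_obsolete_references_py := by
  intro l _ hpre
  unfold Spec_replace_obsolete_references_py
  unfold replace_obsolete_references_py replace_obsolete_references_py_alt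
  have hesc := pvEscape hpre
  have hinv0 : pvInv (PySem.Dict.ofList l) (PySem.Dict.ofList l).size PySem.Dict.empty := by
    intro c v hv
    rw [PySem.Dict.get?_empty] at hv
    cases hv
  rw [pvFold_eq hesc (PySem.Dict.ofList l).keys PySem.Dict.empty PySem.Dict.empty hinv0]
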